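-- pv_equiv track=rewrite | github.com/kentaris/Bachelor-Thesis_Single-Player-Chess | Stages/6_all_rules_implemented/population_generator.py | add_diffByN
-- ===== SOURCE A (Python) =====
-- board_size=5 #to change the board size
--
-- def create_diffBy_list(diff,name,get=False):
--     '''returns the pddl line format of the given diff (=Difference) of two numbers. it returns all combinations of f and r. 'name' refers to the diff_by_[name] and 'get' is not used anywhere yet.'''
--     diffBy_array=[]
--     for rank in range(board_size): #rank
--         for file in range(board_size): #file
--             if abs((rank+1)-(file+1))==diff:
--                 diffBy_array.append((rank+1,file+1))
--     if get:
--         return diffBy_array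
--     diffBy=''
--     for t in diffBy_array:
--         prelude='diff_by_{}'.format(name)#_'+k+l
--         diffBy+='\t\t({} {}{} {}{})\n'.format(prelude,'n',t[0],'n',t[1])
--     return diffBy
--
-- def num2word(n):
--     '''converts a numeric number to a letter word'''
--     #credit: https://stackoverflow.com/a/19506803
--     num2words= {1: 'One', 2: 'Two', 3: 'Three', 4: 'Four', 5: 'Five', 6: 'Six', 7: 'Seven', 8: 'Eight', 9: 'Nine', 10: 'Ten', 11: 'Eleven', 12: 'Twelve', 13: 'Thirteen', 14: 'Fourteen', 15: 'Fifteen', 16: 'Sixteen', 17: 'Seventeen', 18: 'Eighteen', 19: 'Nineteen', 20: 'Twenty', 30: 'Thirty', 40: 'Forty', 50: 'Fifty', 60: 'Sixty', 70: 'Seventy', 80: 'Eighty', 90: 'Ninety', 0: 'Zero'}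
--     try: return num2words[n]
--     except KeyError:
--         try: return num2words[n-n%10]+num2words[n%10].lower()
--         except KeyError: return 'Number out of range'
--
-- def add_diffByN(N):
--     '''returns PDDL lines "(Difference by n1 n1) from 0 up to the nuber given to this function'''
--     R=''
--     for n in range(N):
--         n+=1
--         word=num2word(n)
--         line=create_diffBy_list(n,word)
--         R+='\n\t\t;Difference by {}:\n'.format(word)+line
--     return R
-- ===== SOURCE B (Python) =====
-- def add_diffByN(N):
--     '''returns PDDL lines "(Difference by n1 n1)" from 1 up to the number given'''
--     num2words = {1: 'One', 2: 'Two', 3: 'Three', 4: 'Four', 5: 'Five', 6: 'Six', 7: 'Seven', 8: 'Eight', 9: 'Nine', 10: 'Ten', 11: 'Eleven', 12: 'Twelve', 13: 'Thirteen', 14: 'Fourteen', 15: 'Fifteen', 16: 'Sixteen', 17: 'Seventeen', 18: 'Eighteen', 19: 'Nineteen', 20: 'Twenty', 30: 'Thirty', 40: 'Forty', 50: 'Fifty', 60: 'Sixty', 70: 'Seventy', 80: 'Eighty', 90: 'Ninety', 0: 'Zero'}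
--
--     def num2word(n):
--         if n in num2words:
--             return num2words[n]
--         tens, units = n - n % 10, n % 10
--         if tens in num2words and units in num2words:
--             return num2words[tens] + num2words[units].lower()
--         return 'Number out of range'
--
--     # build the diff -> pairs index once, in a single pass over the 5x5 board
--     index = {}
--     for rank in range(5):
--         for file in range(5):
--             index.setdefault(abs(rank - file), []).append((rank + 1, file + 1))
--
--     R = ''
--     for n in range(1, N + 1):
--         word = num2word(n)
--         lines = ''
--         for a, b in index.get(n, []):
--             lines += '\t\t(diff_by_{} n{} n{})\n'.format(word, a, b)
--         R += '\n\t\t;Difference by {}:\n'.format(word) + lines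
--     return R
-- ===== Notes on version B (the rewrite author's own statement) =====
-- stated objective: faster
-- what changed: B builds a diff->pairs index of the board in one pass and then only does a dictionary lookup per n, instead of A's full board rescan and pair-list rebuild for every n; num2word is inlined with membership tests instead of try/except.
import Mathlib
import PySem

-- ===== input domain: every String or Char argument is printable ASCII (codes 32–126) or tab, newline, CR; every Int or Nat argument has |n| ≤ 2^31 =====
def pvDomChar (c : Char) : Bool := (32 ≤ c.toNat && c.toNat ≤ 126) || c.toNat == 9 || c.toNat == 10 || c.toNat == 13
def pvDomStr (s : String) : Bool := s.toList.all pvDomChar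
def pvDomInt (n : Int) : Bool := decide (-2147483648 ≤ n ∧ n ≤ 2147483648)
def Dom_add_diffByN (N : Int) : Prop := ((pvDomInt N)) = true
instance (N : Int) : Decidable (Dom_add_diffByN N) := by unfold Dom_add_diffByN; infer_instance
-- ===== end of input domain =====

-- B replaces A's per-n rescan of the 5x5 board by a diff->pairs index built once, then per-n lookups.

-- ===== PORT A =====
-- module constant board_size = 5
def board_size : Int := 5

-- create_diffBy_list(diff, name): only the get=False path is ever used by add_diffByN, so only it is ported.
def create_diffBy_list (diff : Int) (name : String) : String :=
  let diffBy_array : List (Int × Int) :=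
    (PySem.List.pyRange 0 board_size).foldl (fun acc rank =>
      (PySem.List.pyRange 0 board_size).foldl (fun acc file =>
        if |(rank + 1) - (file + 1)| = diff then acc ++ [(rank + 1, file + 1)] else acc) acc) []
  diffBy_array.foldl (fun diffBy t =>
    diffBy ++ ("\t\t(" ++ ("diff_by_" ++ name) ++ " n" ++ PySem.Int.toStr t.1 ++ " n" ++ PySem.Int.toStr t.2 ++ ")\n")) ""

def num2words : PySem.Dict Int String :=
  PySem.Dict.ofList [(1, "One"), (2, "Two"), (3, "Three"), (4, "Four"), (5, "Five"), (6, "Six"), (7, "Seven"), (8, "Eight"), (9, "Nine"), (10, "Ten"), (11, "Eleven"), (12, "Twelve"), (13, "Thirteen"), (14, "Fourteen"), (15, "Fifteen"), (16, "Sixteen"), (17, "Seventeen"), (18, "Eighteen"), (19, "Nineteen"), (20, "Twenty"), (30, "Thirty"), (40, "Forty"), (50, "Fifty"), (60, "Sixty"), (70, "Seventy"), (80, "Eighty"), (90, "Ninety"), (0, "Zero")]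

-- try num2words[n] / except KeyError: try num2words[n-n%10]+num2words[n%10].lower() / except: 'Number out of range'
def num2word (n : Int) : String :=
  match num2words.get? n with
  | some w => w
  | none =>
    match num2words.get? (n - PySem.Int.mod n 10), num2words.get? (PySem.Int.mod n 10) with
    | some a, some b => a ++ PySem.Str.lower b
    | _, _ => "Number out of range"

def add_diffByN (N : Int) : String :=
  (PySem.List.pyRange 0 N).foldl (fun R n =>
    let n := n + 1
    let word := num2word n
    let line := create_diffBy_list n word
    R ++ ("\n\t\t;Difference by " ++ word ++ ":\n") ++ line) ""

-- ===== PORT B =====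
def num2words_b : PySem.Dict Int String :=
  PySem.Dict.ofList [(1, "One"), (2, "Two"), (3, "Three"), (4, "Four"), (5, "Five"), (6, "Six"), (7, "Seven"), (8, "Eight"), (9, "Nine"), (10, "Ten"), (11, "Eleven"), (12, "Twelve"), (13, "Thirteen"), (14, "Fourteen"), (15, "Fifteen"), (16, "Sixteen"), (17, "Seventeen"), (18, "Eighteen"), (19, "Nineteen"), (20, "Twenty"), (30, "Thirty"), (40, "Forty"), (50, "Fifty"), (60, "Sixty"), (70, "Seventy"), (80, "Eighty"), (90, "Ninety"), (0, "Zero")]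

def num2word_b (n : Int) : String :=
  if num2words_b.contains n then num2words_b.getD n ""
  else
    let tens := n - PySem.Int.mod n 10
    let units := PySem.Int.mod n 10
    if num2words_b.contains tens && num2words_b.contains units then
      num2words_b.getD tens "" ++ PySem.Str.lower (num2words_b.getD units "")
    else "Number out of range"

-- index = {}; for rank/file in range(5): index.setdefault(abs(rank-file), []).append((rank+1, file+1))
def diffIndex : PySem.Dict Int (List (Int × Int)) :=
  (PySem.List.pyRange 0 5).foldl (fun d rank =>
    (PySem.List.pyRange 0 5).foldl (fun d file =>
      d.modify (|rank - file|) [] (fun l => l ++ [(rank + 1, file + 1)])) d) PySem.Dict.empty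

def add_diffByN_alt (N : Int) : String :=
  (PySem.List.pyRange 1 (N + 1)).foldl (fun R n =>
    let word := num2word_b n
    let lines := (diffIndex.getD n []).foldl (fun lines t =>
      lines ++ ("\t\t(diff_by_" ++ word ++ " n" ++ PySem.Int.toStr t.1 ++ " n" ++ PySem.Int.toStr t.2 ++ ")\n")) ""
    R ++ ("\n\t\t;Difference by " ++ word ++ ":\n") ++ lines) ""

-- ===== PRECONDITION & SPEC =====
def Spec_add_diffByN (N : Int) (out : String) : Prop := out = add_diffByN_alt N
instance (N : Int) (out : String) : Decidable (Spec_add_diffByN N out) := by unfold Spec_add_diffByN; infer_instance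

-- ===== CLAIM (what is proved, stated in full; the proofs are below) =====
def Claim_equal_add_diffByN : Prop := ∀ (N : Int), Dom_add_diffByN N → Spec_add_diffByN N (add_diffByN N)

-- ===== LEMMAS AND PROOFS =====
theorem pv_contains_eq {κ ν : Type} [BEq κ] (d : PySem.Dict κ ν) (k : κ) :
    d.contains k = (d.get? k).isSome := by
  simp only [PySem.Dict.contains, PySem.Dict.get?, Option.isSome_map]
  rw [List.isSome_find?]
theorem pv_getD_eq {κ ν : Type} [BEq κ] (d : PySem.Dict κ ν) (k : κ) (v : ν) :
    d.getD k v = (d.get? k).getD v := by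
  simp [PySem.Dict.getD]
theorem pyRange_nil (a b : Int) (h : b ≤ a) : PySem.List.pyRange a b = [] := by
  simp [PySem.List.pyRange]; omega

theorem pyRange_succ_map (a b : Int) :
    PySem.List.pyRange (a + 1) (b + 1) = (PySem.List.pyRange a b).map (· + 1) := by
  by_cases h : b ≤ a
  · rw [pyRange_nil _ _ (by omega), pyRange_nil _ _ h]; rfl
  · have h : a < b := by omega
    have hk : ∃ k : Nat, b - a = (k : Int) ∧ 0 < (k:Int) := ⟨(b - a).toNat, by omega, by omega⟩
    obtain ⟨k, hk, -⟩ := hk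
    induction k generalizing a with
    | zero => omega
    | succ m ih =>
      rw [PySem.List.pyRange_one_cons (by omega : a + 1 < b + 1),
          PySem.List.pyRange_one_cons (by omega : a < b), List.map_cons]
      by_cases hm : a + 1 < b
      · rw [ih (a+1) (by omega) (by omega) (by omega)]
      · have : b = a + 1 := by omega
        subst this
        rw [pyRange_nil (a+1) (a+1) le_rfl, pyRange_nil (a+1+1) (a+1+1) le_rfl]
        rfl

theorem num2word_b_eq (n : Int) : num2word_b n = num2word n := by
  have e : num2words_b = num2words := rfl
  unfold num2word_b num2word
  rw [e]
  cases h : num2words.get? n with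
  | some w => simp [pv_contains_eq, pv_getD_eq, h]
  | none =>
    simp only [pv_contains_eq, pv_getD_eq, h, Option.isSome_none, if_false, Bool.false_eq_true]
    cases h1 : num2words.get? (n - PySem.Int.mod n 10) <;>
      cases h2 : num2words.get? (PySem.Int.mod n 10) <;>
        simp_all

theorem pairs_eq (n : Int) (hn : 1 ≤ n) :
    ((PySem.List.pyRange 0 board_size).foldl (fun acc rank =>
      (PySem.List.pyRange 0 board_size).foldl (fun acc file =>
        if |(rank + 1) - (file + 1)| = n then acc ++ [(rank + 1, file + 1)] else acc) acc) []) =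
    diffIndex.getD n [] := by
  by_cases h4 : n ≤ 4
  · interval_cases n <;> decide
  · have hidx : diffIndex = PySem.Dict.mk
        [(0, [(1,1),(2,2),(3,3),(4,4),(5,5)]),
         (1, [(1,2),(2,1),(2,3),(3,2),(3,4),(4,3),(4,5),(5,4)]),
         (2, [(1,3),(2,4),(3,1),(3,5),(4,2),(5,3)]),
         (3, [(1,4),(2,5),(4,1),(5,2)]),
         (4, [(1,5),(5,1)])] := by decide
    have hb0 : ((0:Int) == n) = false := by simp; omega
    have hb1 : ((1:Int) == n) = false := by simp; omega
    have hb2 : ((2:Int) == n) = false := by simp; omega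
    have hb3 : ((3:Int) == n) = false := by simp; omega
    have hb4 : ((4:Int) == n) = false := by simp; omega
    rw [hidx, show PySem.List.pyRange 0 board_size = [0,1,2,3,4] from by decide]
    have hinner : ∀ acc : List (Int × Int), ∀ r : Int, r ∈ ([0,1,2,3,4] : List Int) →
        List.foldl (fun acc file =>
          if |(r + 1) - (file + 1)| = n then acc ++ [(r + 1, file + 1)] else acc) acc [0,1,2,3,4] = acc := by
      intro acc r hr
      fin_cases hr <;>
        simp only [List.foldl_cons, List.foldl_nil] <;>
        rw [if_neg (by simp; omega), if_neg (by simp; omega), if_neg (by simp; omega),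
            if_neg (by simp; omega), if_neg (by simp; omega)]
    rw [PySem.List.foldl_congr_mem _ _ (fun acc _ => acc) _ (fun acc r hr => hinner acc r hr)]
    simp [PySem.Dict.getD, PySem.Dict.get?, hb0, hb1, hb2, hb3, hb4]

theorem line_eq (w : String) (l : List (Int × Int)) :
    l.foldl (fun s t =>
      s ++ ("\t\t(" ++ ("diff_by_" ++ w) ++ " n" ++ PySem.Int.toStr t.1 ++ " n" ++ PySem.Int.toStr t.2 ++ ")\n")) "" =
    l.foldl (fun s t =>
      s ++ ("\t\t(diff_by_" ++ w ++ " n" ++ PySem.Int.toStr t.1 ++ " n" ++ PySem.Int.toStr t.2 ++ ")\n")) "" := by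
  apply PySem.List.foldl_congr_mem
  intro s t _
  have h : "\t\t(" ++ ("diff_by_" ++ w) = "\t\t(diff_by_" ++ w := by
    rw [← String.append_assoc]
    congr 1
  rw [h]

theorem step_eq (n : Int) (hn : 1 ≤ n) (R : String) :
    R ++ ("\n\t\t;Difference by " ++ num2word n ++ ":\n") ++ create_diffBy_list n (num2word n) =
    R ++ ("\n\t\t;Difference by " ++ num2word_b n ++ ":\n") ++
      ((diffIndex.getD n []).foldl (fun lines t =>
        lines ++ ("\t\t(diff_by_" ++ num2word_b n ++ " n" ++ PySem.Int.toStr t.1 ++ " n" ++ PySem.Int.toStr t.2 ++ ")\n")) "") := by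
  rw [num2word_b_eq]
  congr 1
  unfold create_diffBy_list
  rw [pairs_eq n hn]
  exact line_eq (num2word n) (diffIndex.getD n [])

-- ===== VERDICT (by name: the statement is the Claim_ definition above) =====
theorem add_diffByN_spec : Claim_equal_add_diffByN := by
  intro N _
  show add_diffByN N = add_diffByN_alt N
  unfold add_diffByN add_diffByN_alt
  rw [show PySem.List.pyRange 1 (N + 1) = (PySem.List.pyRange 0 N).map (· + 1) from by
        simpa using pyRange_succ_map 0 N,
      List.foldl_map]
  apply PySem.List.foldl_congr_mem
  intro R n hmem
  have hn : 0 ≤ n := (PySem.List.mem_pyRange_one.mp hmem).1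
  simpa using step_eq (n + 1) (by omega) R
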